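-- pv_equiv track=rewrite | github.com/Danaila-Andrei/Python-Task | mat-cache.py | numara_clustere
-- ===== SOURCE A (Python) =====
-- def numara_clustere(matrix):
--     count = 0
--     rows, cols = len(matrix), len(matrix[0])
--     visited = set()
--
--     def dfs(i, j, cluster):
--         if i < 0 or i >= rows or j < 0 or j >= cols or matrix[i][j] != '1' or (i, j) in visited:
--             return cluster
--         visited.add((i, j))
--         cluster.add((i, j))
--         if len(cluster) > 2:
--             return set()
--         for x, y in [(i - 1, j), (i + 1, j), (i, j - 1), (i, j + 1)]:
--             cluster = dfs(x, y, cluster)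
--             if len(cluster) > 2:
--                 return set()
--         return cluster
--
--     def is_isolated(cluster):
--         for i, j in cluster:
--             for x, y in [(i - 1, j), (i + 1, j), (i, j - 1), (i, j + 1)]:
--                 if 0 <= x < rows and 0 <= y < cols and matrix[x][y] == '1' and (x, y) not in cluster:
--                     return False
--         return True
--
--     for i in range(rows):
--         for j in range(cols):
--             if matrix[i][j] == '1' and (i, j) not in visited:
--                 cluster = dfs(i, j, set())
--                 if len(cluster) == 2 and is_isolated(cluster):
--                     count += 1
--     return count
-- ===== SOURCE B (Python) =====
-- def numara_clustere(matrix):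
--     rows, cols = len(matrix), len(matrix[0])
--
--     def one(i, j):
--         return 0 <= i < rows and 0 <= j < cols and matrix[i][j] == '1'
--
--     def lonely_pair(i, j, x, y):
--         # (i, j) and (x, y) are both '1' and each has no other '1' neighbour
--         return (one(x, y)
--                 and all((a, b) == (x, y) or not one(a, b)
--                         for a, b in ((i - 1, j), (i + 1, j), (i, j - 1), (i, j + 1)))
--                 and all((a, b) == (i, j) or not one(a, b)
--                         for a, b in ((x - 1, y), (x + 1, y), (x, y - 1), (x, y + 1))))
--
--     count = 0
--     for i in range(rows):
--         for j in range(cols):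
--             if matrix[i][j] == '1' and (lonely_pair(i, j, i, j + 1) or lonely_pair(i, j, i + 1, j)):
--                 count += 1
--     return count
-- ===== Notes on version B (the rewrite author's own statement) =====
-- stated objective: simpler
-- what changed: A's truncated recursive DFS with a visited set plus a second is_isolated re-scan is replaced by a single local stencil scan: a cluster of size exactly two is precisely a pair of adjacent '1' cells none of whose other neighbours is '1', so B just counts cells whose right or down neighbour completes such a lonely pair.
import Mathlib
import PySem

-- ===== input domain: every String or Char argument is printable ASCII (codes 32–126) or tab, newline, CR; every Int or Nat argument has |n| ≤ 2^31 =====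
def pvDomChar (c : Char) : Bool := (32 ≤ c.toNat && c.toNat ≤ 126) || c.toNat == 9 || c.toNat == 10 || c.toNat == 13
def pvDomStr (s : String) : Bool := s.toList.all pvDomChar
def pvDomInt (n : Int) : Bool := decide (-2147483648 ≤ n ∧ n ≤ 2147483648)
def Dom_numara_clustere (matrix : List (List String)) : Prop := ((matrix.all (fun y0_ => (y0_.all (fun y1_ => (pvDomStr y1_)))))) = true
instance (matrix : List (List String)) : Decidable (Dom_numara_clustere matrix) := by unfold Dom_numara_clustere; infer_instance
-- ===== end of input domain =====

-- B replaces A's truncated DFS + isolation re-scan by a single local stencil scan: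
-- a component of size exactly two is precisely a pair of adjacent '1' cells each of
-- whose other neighbours are all non-'1', so B counts cells whose right or down
-- neighbour forms such a "lonely pair" (objective: simpler; no speed claim).

-- shared accessor: matrix[i][j] (none exactly where Python raises IndexError)
def matGet (m : List (List String)) (i j : Int) : Option String :=
  (PySem.List.pyGet? m i).bind (fun r => PySem.List.pyGet? r j)

-- the Python neighbour list [(i-1,j),(i+1,j),(i,j-1),(i,j+1)]
def nbrsL (i j : Int) : List (Int × Int) := [(i-1,j),(i+1,j),(i,j-1),(i,j+1)]

-- ===== PORT A =====
-- dfs: Python's recursion, with the shared mutable `visited` threaded through and a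
-- fuel counter as totality device (`none` = fuel exhausted; proved unreachable at the
-- fuel the outer loop passes).  The `for x, y in [...]` loop is goA.
mutual
def dfsA (m : List (List String)) (rows cols : Int) :
    Nat → Int → Int → PySem.Set (Int × Int) → PySem.Set (Int × Int) →
    Option (PySem.Set (Int × Int) × PySem.Set (Int × Int))
  | 0, _, _, _, _ => none
  | fuel+1, i, j, cluster, visited =>
    if i < 0 ∨ rows ≤ i ∨ j < 0 ∨ cols ≤ j ∨ matGet m i j ≠ some "1" ∨ (i, j) ∈ visited then
      some (cluster, visited)
    else
      let visited1 := PySem.Set.add visited (i, j)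
      let cluster1 := PySem.Set.add cluster (i, j)
      if 2 < PySem.Set.len cluster1 then some (PySem.Set.empty, visited1)
      else goA m rows cols fuel (nbrsL i j) cluster1 visited1
  termination_by fuel _ _ _ _ => (fuel, 0)
def goA (m : List (List String)) (rows cols : Int) :
    Nat → List (Int × Int) → PySem.Set (Int × Int) → PySem.Set (Int × Int) →
    Option (PySem.Set (Int × Int) × PySem.Set (Int × Int))
  | _, [], cluster, visited => some (cluster, visited)
  | fuel, n :: rest, cluster, visited =>
    match dfsA m rows cols fuel n.1 n.2 cluster visited with
    | none => none
    | some (cluster', visited') =>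
      if 2 < PySem.Set.len cluster' then some (PySem.Set.empty, visited')
      else goA m rows cols fuel rest cluster' visited'
  termination_by fuel l _ _ => (fuel, l.length + 1)
end

-- is_isolated(cluster), as an all-quantified scan (early return False = all)
def isoA (m : List (List String)) (rows cols : Int) (cluster : PySem.Set (Int × Int)) : Bool :=
  cluster.all (fun p =>
    (nbrsL p.1 p.2).all (fun q =>
      !(decide (0 ≤ q.1) && decide (q.1 < rows) && decide (0 ≤ q.2) && decide (q.2 < cols)
        && (matGet m q.1 q.2 == some "1") && !(PySem.Set.contains cluster q))))

-- one cell of the outer double loop (state = (count, visited))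
def stepA (m : List (List String)) (rows cols : Int) (fuel : Nat)
    (st : Int × PySem.Set (Int × Int)) (c : Int × Int) : Int × PySem.Set (Int × Int) :=
  if (matGet m c.1 c.2 == some "1") && !(PySem.Set.contains st.2 c) then
    match dfsA m rows cols fuel c.1 c.2 PySem.Set.empty st.2 with
    | none => st
    | some (cl, vis) =>
      ((if (PySem.Set.len cl == 2) && isoA m rows cols cl then st.1 + 1 else st.1), vis)
  else st

def numara_clustere (matrix : List (List String)) : Int :=
  let rows := PySem.List.len matrix
  let cols := PySem.List.len ((PySem.List.pyGet? matrix 0).getD [])  -- len(matrix[0]); [] outside Pre_ (Python raises)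
  let fuel := rows.toNat * cols.toNat + 1
  ((PySem.List.pyRange 0 rows 1).foldl (fun st i =>
    (PySem.List.pyRange 0 cols 1).foldl (fun st j => stepA matrix rows cols fuel st (i, j)) st)
    (0, PySem.Set.empty)).1

-- ===== PORT B =====
-- Source B's one(i, j)
def oneB (m : List (List String)) (rows cols i j : Int) : Bool :=
  decide (0 ≤ i) && decide (i < rows) && decide (0 ≤ j) && decide (j < cols)
    && (matGet m i j == some "1")

-- Source B's lonely_pair(i, j, x, y)
def lonelyB (m : List (List String)) (rows cols i j x y : Int) : Bool :=
  oneB m rows cols x y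
  && (nbrsL i j).all (fun q => (q == (x, y)) || !oneB m rows cols q.1 q.2)
  && (nbrsL x y).all (fun q => (q == (i, j)) || !oneB m rows cols q.1 q.2)

-- the per-cell condition of Source B's loop body
def PBfun (m : List (List String)) (rows cols i j : Int) : Bool :=
  (matGet m i j == some "1")
    && (lonelyB m rows cols i j i (j+1) || lonelyB m rows cols i j (i+1) j)

def numara_clustere_alt (matrix : List (List String)) : Int :=
  let rows := PySem.List.len matrix
  let cols := PySem.List.len ((PySem.List.pyGet? matrix 0).getD [])  -- len(matrix[0]); [] outside Pre_ (Python raises)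
  (PySem.List.pyRange 0 rows 1).foldl (fun cnt i =>
    (PySem.List.pyRange 0 cols 1).foldl (fun cnt j =>
      if PBfun matrix rows cols i j then cnt + 1 else cnt) cnt) 0

-- ===== PRECONDITION & SPEC =====
-- Pre_ excludes exactly the inputs where Python A raises IndexError: the empty matrix
-- (len(matrix[0])) and matrices with a row shorter than row 0 (matrix[i][j] for j in range(cols)).
def Pre_numara_clustere (matrix : List (List String)) : Prop :=
  matrix ≠ [] ∧ ∀ r ∈ matrix, matrix.headI.length ≤ r.length
instance (matrix : List (List String)) : Decidable (Pre_numara_clustere matrix) := by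
  unfold Pre_numara_clustere; infer_instance

def pvWitness_numara_clustere : List (List String) := [["1", "1"], ["0", "0"]]

def Spec_numara_clustere (matrix : List (List String)) (out : Int) : Prop := out = numara_clustere_alt matrix
instance (matrix : List (List String)) (out : Int) : Decidable (Spec_numara_clustere matrix out) := by unfold Spec_numara_clustere; infer_instance

-- ===== CLAIM (what is proved, stated in full; the proofs are below) =====
def Claim_equal_numara_clustere : Prop := ∀ (matrix : List (List String)), Dom_numara_clustere matrix → Pre_numara_clustere matrix → Spec_numara_clustere matrix (numara_clustere matrix)

-- ===== LEMMAS AND PROOFS =====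

-- ---- grid notions ----
def onePr (m : List (List String)) (rows cols : Int) (p : Int × Int) : Prop :=
  0 ≤ p.1 ∧ p.1 < rows ∧ 0 ≤ p.2 ∧ p.2 < cols ∧ matGet m p.1 p.2 = some "1"

inductive ReachP (m : List (List String)) (rows cols : Int) : (Int × Int) → (Int × Int) → Prop
  | refl (p : Int × Int) : onePr m rows cols p → ReachP m rows cols p p
  | step (s p q : Int × Int) : ReachP m rows cols s p → q ∈ nbrsL p.1 p.2 →
      onePr m rows cols q → ReachP m rows cols s q

def DominoP (m : List (List String)) (rows cols : Int) (a b : Int × Int) : Prop :=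
  onePr m rows cols a ∧ onePr m rows cols b ∧ b ∈ nbrsL a.1 a.2 ∧
  (∀ q ∈ nbrsL a.1 a.2, onePr m rows cols q → q = b) ∧
  (∀ q ∈ nbrsL b.1 b.2, onePr m rows cols q → q = a)

-- ---- neighbour-list facts ----
theorem nbrs_symm (p q : Int × Int) : q ∈ nbrsL p.1 p.2 ↔ p ∈ nbrsL q.1 q.2 := by
  rcases p with ⟨a, b⟩; rcases q with ⟨c, d⟩
  simp only [nbrsL, List.mem_cons, List.not_mem_nil, or_false, Prod.mk.injEq]
  omega

theorem nbrs_ne {p q : Int × Int} (h : q ∈ nbrsL p.1 p.2) : q ≠ p := by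
  rcases p with ⟨a, b⟩; rcases q with ⟨c, d⟩
  simp only [nbrsL, List.mem_cons, List.not_mem_nil, or_false, Prod.mk.injEq] at h
  simp only [ne_eq, Prod.mk.injEq]; omega

-- ---- reachability facts ----
theorem reach_one_src {m rows cols s x} (h : ReachP m rows cols s x) : onePr m rows cols s := by
  induction h with
  | refl h => exact h
  | step _ _ _ _ _ ih => exact ih

theorem reach_one_tgt {m rows cols s x} (h : ReachP m rows cols s x) : onePr m rows cols x := by
  induction h with
  | refl h => exact h
  | step _ _ _ _ hq _ => exact hq

theorem reach_trans {m rows cols s p x} (h1 : ReachP m rows cols s p)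
    (h2 : ReachP m rows cols p x) : ReachP m rows cols s x := by
  induction h2 with
  | refl _ => exact h1
  | step p q _ hn hq ih => exact ReachP.step _ _ _ ih hn hq

theorem reach_domino {m rows cols a b s x} (hD : DominoP m rows cols a b)
    (h : ReachP m rows cols s x) (hx : x = a ∨ x = b) : s = a ∨ s = b := by
  induction h with
  | refl _ => exact hx
  | step p q hr hn hq ih =>
    apply ih
    rcases hx with rfl | rfl
    · rcases hD with ⟨_, _, _, ha, _⟩
      right
      exact ha p ((nbrs_symm _ _).2 hn) (reach_one_tgt hr)
    · rcases hD with ⟨_, _, _, _, hb⟩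
      left
      exact hb p ((nbrs_symm _ _).2 hn) (reach_one_tgt hr)

theorem domino_symm {m rows cols a b} (h : DominoP m rows cols a b) : DominoP m rows cols b a :=
  ⟨h.2.1, h.1, (nbrs_symm b a).2 h.2.2.1, h.2.2.2.2, h.2.2.2.1⟩

theorem nbrs_nodup (i j : Int) : (nbrsL i j).Nodup := by
  simp only [nbrsL]
  refine List.nodup_cons.2 ⟨?_, List.nodup_cons.2 ⟨?_, List.nodup_cons.2 ⟨?_, List.nodup_singleton _⟩⟩⟩ <;>
    (intro h; simp only [List.mem_cons, List.not_mem_nil, or_false,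
      Prod.mk.injEq] at h; omega)

theorem domino_unique {m rows cols a b b'} (h1 : DominoP m rows cols a b)
    (h2 : DominoP m rows cols a b') : b = b' := by
  exact h2.2.2.2.1 b h1.2.2.1 h1.2.1

-- ---- dfs/go invariants ----
def DinvP (m : List (List String)) (rows cols : Int) (c : Int × Int)
    (cl vis cl' vis' : List (Int × Int)) : Prop :=
  (∀ x ∈ vis, x ∈ vis') ∧
  (∀ x ∈ vis', x ∈ vis ∨ ReachP m rows cols c x) ∧
  (∀ x ∈ cl', x ∈ cl ∨ (ReachP m rows cols c x ∧
      (x = c ∨ ∃ p, p ∈ nbrsL x.1 x.2 ∧ onePr m rows cols p))) ∧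
  (cl.Nodup → cl'.Nodup)

def GinvP (m : List (List String)) (rows cols : Int) (c : Int × Int)
    (cl vis cl' vis' : List (Int × Int)) : Prop :=
  (∀ x ∈ vis, x ∈ vis') ∧
  (∀ x ∈ vis', x ∈ vis ∨ ReachP m rows cols c x) ∧
  (∀ x ∈ cl', x ∈ cl ∨ (ReachP m rows cols c x ∧
      ∃ p, p ∈ nbrsL x.1 x.2 ∧ onePr m rows cols p)) ∧
  (cl.Nodup → cl'.Nodup)

theorem guard_not {rows cols : Int} {m : List (List String)} {i j : Int} {vis : List (Int × Int)}
    (hguard : ¬ (i < 0 ∨ rows ≤ i ∨ j < 0 ∨ cols ≤ j ∨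
      matGet m i j ≠ some "1" ∨ (i, j) ∈ vis)) :
    onePr m rows cols (i, j) ∧ (i, j) ∉ vis := by
  simp only [not_or, not_lt, not_le, not_not] at hguard
  exact ⟨⟨hguard.1, hguard.2.1, hguard.2.2.1, hguard.2.2.2.1, hguard.2.2.2.2.1⟩,
    hguard.2.2.2.2.2⟩

theorem dfs_go_inv (m : List (List String)) (rows cols : Int) : ∀ fuel : Nat,
    (∀ i j cl vis r, dfsA m rows cols fuel i j cl vis = some r →
       DinvP m rows cols (i, j) cl vis r.1 r.2) ∧
    (∀ c l cl vis r, onePr m rows cols c → (∀ n ∈ l, n ∈ nbrsL c.1 c.2) →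
       goA m rows cols fuel l cl vis = some r → GinvP m rows cols c cl vis r.1 r.2) := by
  intro fuel
  induction fuel with
  | zero =>
    constructor
    · intro i j cl vis r h
      simp [dfsA] at h
    · intro c l cl vis r hc hn h
      cases l with
      | nil =>
        simp only [goA, Option.some.injEq] at h
        subst h
        exact ⟨fun x hx => hx, fun x hx => Or.inl hx, fun x hx => Or.inl hx, id⟩
      | cons n rest => simp [goA, dfsA] at h
  | succ f ih =>
    have hD : ∀ i j cl vis r, dfsA m rows cols (f+1) i j cl vis = some r →
        DinvP m rows cols (i, j) cl vis r.1 r.2 := by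
      intro i j cl vis r h
      simp only [dfsA] at h
      split at h
      · rw [Option.some.injEq] at h; subst h
        exact ⟨fun x hx => hx, fun x hx => Or.inl hx, fun x hx => Or.inl hx, id⟩
      · rename_i hguard
        obtain ⟨hone, hniv⟩ := guard_not hguard
        split at h
        · rw [Option.some.injEq] at h; subst h
          refine ⟨?_, ?_, ?_, ?_⟩
          · intro x hx; exact (PySem.Set.mem_add _ _ _).2 (Or.inl hx)
          · intro x hx
            rcases (PySem.Set.mem_add _ _ _).1 hx with h' | h'
            · exact Or.inl h'
            · exact Or.inr (by rw [h']; exact ReachP.refl _ hone)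
          · intro x hx; exact absurd hx (by simp [PySem.Set.empty])
          · intro _; exact List.nodup_nil
        · obtain ⟨g1, g2, g3, g4⟩ := ih.2 (i, j) (nbrsL i j) (PySem.Set.add cl (i, j))
            (PySem.Set.add vis (i, j)) r hone (fun n hn => hn) h
          refine ⟨?_, ?_, ?_, ?_⟩
          · intro x hx; exact g1 x ((PySem.Set.mem_add _ _ _).2 (Or.inl hx))
          · intro x hx
            rcases g2 x hx with h' | h'
            · rcases (PySem.Set.mem_add _ _ _).1 h' with h'' | h''
              · exact Or.inl h''
              · exact Or.inr (by rw [h'']; exact ReachP.refl _ hone)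
            · exact Or.inr h'
          · intro x hx
            rcases g3 x hx with h' | h'
            · rcases (PySem.Set.mem_add _ _ _).1 h' with h'' | h''
              · exact Or.inl h''
              · exact Or.inr ⟨by rw [h'']; exact ReachP.refl _ hone, Or.inl h''⟩
            · exact Or.inr ⟨h'.1, Or.inr h'.2⟩
          · intro hnd; exact g4 (PySem.Set.nodup_add _ _ hnd)
    have hGstep : ∀ c l cl vis r, onePr m rows cols c → (∀ n ∈ l, n ∈ nbrsL c.1 c.2) →
        goA m rows cols (f+1) l cl vis = some r → GinvP m rows cols c cl vis r.1 r.2 := by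
      intro c l
      induction l with
      | nil =>
        intro cl vis r hc hn h
        simp only [goA, Option.some.injEq] at h
        subst h
        exact ⟨fun x hx => hx, fun x hx => Or.inl hx, fun x hx => Or.inl hx, id⟩
      | cons n rest ihl =>
        intro cl vis r hc hn h
        simp only [goA] at h
        split at h
        · exact absurd h (by simp)
        · rename_i cl1 vis1 hdfs
          obtain ⟨d1, d2, d3, d4⟩ := hD n.1 n.2 cl vis (cl1, vis1) hdfs
          have hnm : n ∈ nbrsL c.1 c.2 := hn n List.mem_cons_self
          have hlift : ∀ x, ReachP m rows cols (n.1, n.2) x → ReachP m rows cols c x := by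
            intro x hx
            have hone_n : onePr m rows cols (n.1, n.2) := reach_one_src hx
            have hcn : ReachP m rows cols c (n.1, n.2) :=
              ReachP.step c c (n.1, n.2) (ReachP.refl c hc) (by simpa using hnm) hone_n
            exact reach_trans hcn hx
          split at h
          · rw [Option.some.injEq] at h; subst h
            refine ⟨?_, ?_, ?_, ?_⟩
            · intro x hx; exact d1 x hx
            · intro x hx
              rcases d2 x hx with h' | h'
              · exact Or.inl h'
              · exact Or.inr (hlift x h')
            · intro x hx; exact absurd hx (by simp [PySem.Set.empty])
            · intro _; exact List.nodup_nil
          · obtain ⟨g1, g2, g3, g4⟩ := ihl cl1 vis1 r hc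
              (fun q hq => hn q (List.mem_cons_of_mem _ hq)) h
            refine ⟨?_, ?_, ?_, ?_⟩
            · intro x hx; exact g1 x (d1 x hx)
            · intro x hx
              rcases g2 x hx with h' | h'
              · rcases d2 x h' with h'' | h''
                · exact Or.inl h''
                · exact Or.inr (hlift x h'')
              · exact Or.inr h'
            · intro x hx
              rcases g3 x hx with h' | h'
              · rcases d3 x h' with h'' | h''
                · exact Or.inl h''
                · refine Or.inr ⟨hlift x h''.1, ?_⟩
                  rcases h''.2 with h3 | h3
                  · refine ⟨c, ?_, hc⟩
                    rw [h3]
                    exact (nbrs_symm c n).1 hnm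
                  · exact h3
              · exact Or.inr h'
            · intro hnd; exact g4 (d4 hnd)
    exact ⟨hD, hGstep⟩

-- ---- fuel sufficiency ----
def Ucard (rows cols : Int) (vis : List (Int × Int)) : Nat :=
  (((Finset.range rows.toNat) ×ˢ (Finset.range cols.toNat)).filter
    (fun p => ((p.1 : Int), (p.2 : Int)) ∉ vis)).card

theorem Ucard_mono {rows cols : Int} {vis vis' : List (Int × Int)}
    (h : ∀ x ∈ vis, x ∈ vis') : Ucard rows cols vis' ≤ Ucard rows cols vis := by
  apply Finset.card_le_card
  intro p hp
  simp only [Finset.mem_filter] at hp ⊢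
  exact ⟨hp.1, fun hm => hp.2 (h _ hm)⟩

theorem Ucard_lt_of_add {m : List (List String)} {rows cols : Int} {vis : List (Int × Int)}
    {p : Int × Int} (h1 : onePr m rows cols p) (h2' : p ∉ vis) :
    Ucard rows cols (PySem.Set.add vis p) < Ucard rows cols vis := by
  apply Finset.card_lt_card
  have hsub : (((Finset.range rows.toNat) ×ˢ (Finset.range cols.toNat)).filter
      (fun q => ((q.1 : Int), (q.2 : Int)) ∉ PySem.Set.add vis p)) ⊆
      (((Finset.range rows.toNat) ×ˢ (Finset.range cols.toNat)).filter
      (fun q => ((q.1 : Int), (q.2 : Int)) ∉ vis)) := by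
    intro q hq
    simp only [Finset.mem_filter] at hq ⊢
    exact ⟨hq.1, fun hm => hq.2 ((PySem.Set.mem_add vis p _).2 (Or.inl hm))⟩
  rw [Finset.ssubset_iff_of_subset hsub]
  obtain ⟨h0, h1l, h2, h3l, _⟩ := h1
  refine ⟨(p.1.toNat, p.2.toNat), ?_, ?_⟩
  · simp only [Finset.mem_filter, Finset.mem_product, Finset.mem_range]
    constructor
    · constructor <;> omega
    · have : ((p.1.toNat : Int), (p.2.toNat : Int)) = p := by
        rcases p with ⟨x, y⟩; simp only [Prod.mk.injEq]; omega
      rw [this]; exact h2'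
  · intro hq
    simp only [Finset.mem_filter] at hq
    apply hq.2
    have : ((p.1.toNat : Int), (p.2.toNat : Int)) = p := by
      rcases p with ⟨x, y⟩; simp only [Prod.mk.injEq]; omega
    rw [this]
    exact (PySem.Set.mem_add vis p p).2 (Or.inr rfl)

theorem Ucard_le (rows cols : Int) (vis : List (Int × Int)) :
    Ucard rows cols vis ≤ rows.toNat * cols.toNat := by
  calc Ucard rows cols vis ≤ ((Finset.range rows.toNat) ×ˢ (Finset.range cols.toNat)).card :=
        Finset.card_filter_le _ _
    _ = rows.toNat * cols.toNat := by rw [Finset.card_product, Finset.card_range, Finset.card_range]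

theorem dfs_go_some (m : List (List String)) (rows cols : Int) : ∀ fuel : Nat,
    (∀ i j cl vis, Ucard rows cols vis < fuel → ∃ r, dfsA m rows cols fuel i j cl vis = some r) ∧
    (∀ l cl vis, Ucard rows cols vis < fuel → ∃ r, goA m rows cols fuel l cl vis = some r) := by
  intro fuel
  induction fuel with
  | zero =>
    exact ⟨fun _ _ _ _ h => absurd h (Nat.not_lt_zero _),
      fun _ _ _ h => absurd h (Nat.not_lt_zero _)⟩
  | succ f ih =>
    have hDs : ∀ i j cl vis, Ucard rows cols vis < f + 1 →
        ∃ r, dfsA m rows cols (f+1) i j cl vis = some r := by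
      intro i j cl vis hU
      simp only [dfsA]
      split
      · exact ⟨_, rfl⟩
      · rename_i hguard
        obtain ⟨hone, hniv⟩ := guard_not hguard
        split
        · exact ⟨_, rfl⟩
        · have hU1 : Ucard rows cols (PySem.Set.add vis (i, j)) < f :=
            Nat.lt_of_lt_of_le (Ucard_lt_of_add hone hniv) (Nat.lt_succ_iff.1 hU)
          exact ih.2 (nbrsL i j) (PySem.Set.add cl (i, j)) (PySem.Set.add vis (i, j)) hU1
    have hGs : ∀ l cl vis, Ucard rows cols vis < f + 1 →
        ∃ r, goA m rows cols (f+1) l cl vis = some r := by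
      intro l
      induction l with
      | nil => intro cl vis _; exact ⟨(cl, vis), by simp [goA]⟩
      | cons n rest ihl =>
        intro cl vis hU
        obtain ⟨rv, hdfs⟩ := hDs n.1 n.2 cl vis hU
        obtain ⟨cl1, vis1⟩ := rv
        have hvsub := (dfs_go_inv m rows cols (f+1)).1 n.1 n.2 cl vis (cl1, vis1) hdfs
        have hU1 : Ucard rows cols vis1 < f + 1 := Nat.lt_of_le_of_lt (Ucard_mono hvsub.1) hU
        simp only [goA, hdfs]
        split
        · exact ⟨_, rfl⟩
        · exact ihl cl1 vis1 hU1
    exact ⟨hDs, hGs⟩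

-- ---- exact behaviour of dfs on an unvisited lonely pair ----
theorem dfs_guard_true {m rows cols fuel i j cl vis}
    (h : ¬ (onePr m rows cols (i, j) ∧ (i, j) ∉ vis)) :
    dfsA m rows cols (fuel+1) i j cl vis = some (cl, vis) := by
  have hg : i < 0 ∨ rows ≤ i ∨ j < 0 ∨ cols ≤ j ∨ matGet m i j ≠ some "1" ∨ (i, j) ∈ vis := by
    by_cases h0 : (i, j) ∈ vis
    · exact Or.inr (Or.inr (Or.inr (Or.inr (Or.inr h0))))
    · have h1 : ¬ onePr m rows cols (i, j) := fun ho => h ⟨ho, h0⟩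
      unfold onePr at h1
      simp only [not_and_or, not_le, not_lt] at h1
      rcases h1 with h' | h' | h' | h' | h'
      · exact Or.inl h'
      · exact Or.inr (Or.inl h')
      · exact Or.inr (Or.inr (Or.inl h'))
      · exact Or.inr (Or.inr (Or.inr (Or.inl h')))
      · exact Or.inr (Or.inr (Or.inr (Or.inr (Or.inl h'))))
  simp only [dfsA]
  rw [if_pos hg]

theorem go_all_skip {m rows cols fuel cl vis} (hcl : ¬ (2 < PySem.Set.len cl)) :
    ∀ l : List (Int × Int), (∀ n ∈ l, ¬ onePr m rows cols n ∨ n ∈ vis) →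
    goA m rows cols (fuel+1) l cl vis = some (cl, vis) := by
  intro l
  induction l with
  | nil => intro _; simp [goA]
  | cons n rest ih =>
    intro hall
    have hskip : dfsA m rows cols (fuel+1) n.1 n.2 cl vis = some (cl, vis) := by
      apply dfs_guard_true
      rintro ⟨ho, hv⟩
      rcases hall n (List.mem_cons_self) with h | h
      · exact h (by simpa using ho)
      · exact hv (by simpa using h)
    simp only [goA, hskip]
    rw [if_neg hcl]
    exact ih (fun x hx => hall x (List.mem_cons_of_mem _ hx))

theorem dfs_guard_false {m rows cols} {d : Int × Int} {vis : List (Int × Int)}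
    (h1 : onePr m rows cols d) (h2 : d ∉ vis) :
    ¬ (d.1 < 0 ∨ rows ≤ d.1 ∨ d.2 < 0 ∨ cols ≤ d.2 ∨
        matGet m d.1 d.2 ≠ some "1" ∨ (d.1, d.2) ∈ vis) := by
  obtain ⟨a1, a2, a3, a4, a5⟩ := h1
  simp only [not_or, not_lt, not_le, not_not]
  exact ⟨a1, a2, a3, a4, by simpa using a5, by simpa using h2⟩

theorem dfs_at_partner {m rows cols fuel cl vis} {d : Int × Int}
    (h1 : onePr m rows cols d) (h2 : d ∉ vis)
    (h3 : ∀ p ∈ nbrsL d.1 d.2, ¬ onePr m rows cols p ∨ p ∈ PySem.Set.add vis d)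
    (h4 : ¬ (2 < PySem.Set.len (PySem.Set.add cl d))) :
    dfsA m rows cols (fuel+1+1) d.1 d.2 cl vis =
      some (PySem.Set.add cl d, PySem.Set.add vis d) := by
  simp only [dfsA]
  rw [if_neg (dfs_guard_false h1 h2)]
  simp only [Prod.mk.eta]
  rw [if_neg h4]
  exact go_all_skip h4 _ h3

theorem go_with_partner {m rows cols fuel cl vis} {d : Int × Int}
    (h1 : onePr m rows cols d) (h2 : d ∉ vis)
    (h3 : ∀ p ∈ nbrsL d.1 d.2, ¬ onePr m rows cols p ∨ p ∈ PySem.Set.add vis d)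
    (h4 : ¬ (2 < PySem.Set.len (PySem.Set.add cl d))) (h5 : ¬ (2 < PySem.Set.len cl)) :
    ∀ l₁ l₂ : List (Int × Int), (∀ n ∈ l₁ ++ l₂, ¬ onePr m rows cols n) →
    goA m rows cols (fuel+1+1) (l₁ ++ d :: l₂) cl vis =
      some (PySem.Set.add cl d, PySem.Set.add vis d) := by
  intro l₁
  induction l₁ with
  | nil =>
    intro l₂ hall
    simp only [List.nil_append, goA, dfs_at_partner h1 h2 h3 h4]
    rw [if_neg h4]
    exact go_all_skip (fuel := fuel + 1) (vis := PySem.Set.add vis d) h4 l₂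
      (fun n hn => Or.inl (hall n (by simpa using hn)))
  | cons n l₁' ih =>
    intro l₂ hall
    have hskip : dfsA m rows cols (fuel+1+1) n.1 n.2 cl vis = some (cl, vis) :=
      dfs_guard_true (fun hc => (hall n (by simp)) (by simpa using hc.1))
    simp only [List.cons_append, goA, hskip]
    rw [if_neg h5]
    exact ih l₂ (fun x hx => hall x (by
      rcases List.mem_append.1 hx with h | h
      · exact List.mem_append.2 (Or.inl (List.mem_cons_of_mem _ h))
      · exact List.mem_append.2 (Or.inr h)))

theorem dfs_domino {m rows cols fuel vis} {c d : Int × Int}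
    (hD : DominoP m rows cols c d) (hc : c ∉ vis) (hd : d ∉ vis) :
    dfsA m rows cols (fuel+1+1+1) c.1 c.2 PySem.Set.empty vis =
      some (PySem.Set.add (PySem.Set.add PySem.Set.empty c) d,
            PySem.Set.add (PySem.Set.add vis c) d) := by
  have hdc : d ≠ c := nbrs_ne hD.2.2.1
  have hc1 : PySem.Set.add (PySem.Set.empty (α := Int × Int)) c = [c] := by
    rw [show (PySem.Set.empty : PySem.Set (Int × Int)) = [] from rfl,
      PySem.Set.add_of_not_mem (by simp)]
    rfl
  have hlen1 : ¬ (2 < PySem.Set.len (PySem.Set.add PySem.Set.empty c)) := by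
    rw [hc1, PySem.Set.len_eq]; simp
  simp only [dfsA]
  rw [if_neg (dfs_guard_false hD.1 hc)]
  simp only [Prod.mk.eta]
  rw [if_neg hlen1]
  have h2' : d ∉ PySem.Set.add vis c := by
    rw [PySem.Set.add_of_not_mem hc]
    intro hm
    rcases List.mem_append.1 hm with h | h
    · exact hd h
    · exact hdc (by simpa using h)
  have h3' : ∀ p ∈ nbrsL d.1 d.2, ¬ onePr m rows cols p ∨
      p ∈ PySem.Set.add (PySem.Set.add vis c) d := by
    intro p hp
    by_cases ho : onePr m rows cols p
    · right
      have : p = c := hD.2.2.2.2 p hp ho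
      subst this
      exact (PySem.Set.mem_add _ _ _).2 (Or.inl ((PySem.Set.mem_add _ _ _).2 (Or.inr rfl)))
    · exact Or.inl ho
  have h4' : ¬ (2 < PySem.Set.len (PySem.Set.add (PySem.Set.add PySem.Set.empty c) d)) := by
    rw [hc1, PySem.Set.add_of_not_mem (by simpa using hdc : d ∉ [c]), PySem.Set.len_eq]
    simp
  obtain ⟨l₁, l₂, hsplit⟩ := List.append_of_mem hD.2.2.1
  have hnd := nbrs_nodup c.1 c.2
  rw [hsplit] at hnd
  have hdnot : d ∉ l₁ ++ l₂ := by
    intro hm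
    rcases List.mem_append.1 hm with h | h
    · exact (List.disjoint_of_nodup_append hnd) h (List.mem_cons_self)
    · have := List.Nodup.of_append_right hnd
      exact (List.nodup_cons.1 this).1 h
  have hother : ∀ n ∈ l₁ ++ l₂, ¬ onePr m rows cols n := by
    intro n hn ho
    have hne : n ≠ d := fun he => hdnot (he ▸ hn)
    have hmem : n ∈ nbrsL c.1 c.2 := by
      rw [hsplit]
      rcases List.mem_append.1 hn with h | h
      · exact List.mem_append.2 (Or.inl h)
      · exact List.mem_append.2 (Or.inr (List.mem_cons_of_mem _ h))
    exact hne (hD.2.2.2.1 n hmem ho)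
  rw [hsplit]
  exact go_with_partner hD.2.1 h2' h3' h4' hlen1 l₁ l₂ hother

-- ---- characterisations of the two per-cell tests ----
theorem iso_iff {m rows cols} (cl : PySem.Set (Int × Int)) :
    isoA m rows cols cl = true ↔
      ∀ x ∈ cl, ∀ q ∈ nbrsL x.1 x.2, onePr m rows cols q → q ∈ cl := by
  unfold isoA
  rw [List.all_eq_true]
  constructor
  · intro h x hx q hq hone
    have h2 := List.all_eq_true.1 (h x hx) q hq
    by_contra hqc
    obtain ⟨a1, a2, a3, a4, a5⟩ := hone
    simp [a1, a2, a3, a4, a5] at h2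
    exact hqc h2
  · intro h x hx
    rw [List.all_eq_true]
    intro q hq
    by_cases hone : onePr m rows cols q
    · have hmem := h x hx q hq hone
      simp [hmem]
    · unfold onePr at hone
      simp only [not_and_or, not_le, not_lt] at hone
      rcases hone with h1 | h1 | h1 | h1 | h1
      · simp [show ¬ (0 ≤ q.1) by omega]
      · simp [show ¬ (q.1 < rows) by omega]
      · simp [show ¬ (0 ≤ q.2) by omega]
      · simp [show ¬ (q.2 < cols) by omega]
      · simp [h1]

theorem oneB_iff (m : List (List String)) (rows cols x y : Int) :
    oneB m rows cols x y = true ↔ onePr m rows cols (x, y) := by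
  simp [oneB, onePr, and_assoc]

theorem lonely_iff {m : List (List String)} {rows cols i j x y : Int}
    (hone : onePr m rows cols (i, j)) (hxy : (x, y) ∈ nbrsL i j) :
    lonelyB m rows cols i j x y = true ↔ DominoP m rows cols (i, j) (x, y) := by
  have hq : ∀ (a b : Int) (q : Int × Int), ((q == (a, b)) || !oneB m rows cols q.1 q.2) = true ↔
      (onePr m rows cols q → q = (a, b)) := by
    intro a b q
    rw [Bool.or_eq_true, beq_iff_eq, Bool.not_eq_true']
    constructor
    · rintro (h' | h') ho
      · exact h'
      · exact absurd ((oneB_iff m rows cols q.1 q.2).2 (by simpa using ho)) (by simp [h'])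
    · intro himp
      by_cases ho : onePr m rows cols q
      · exact Or.inl (himp ho)
      · right
        rw [Bool.eq_false_iff]
        intro hb
        exact ho (by simpa using (oneB_iff m rows cols q.1 q.2).1 hb)
  unfold lonelyB DominoP
  rw [Bool.and_eq_true, Bool.and_eq_true, List.all_eq_true, List.all_eq_true]
  constructor
  · rintro ⟨⟨hb, hall1⟩, hall2⟩
    refine ⟨hone, (oneB_iff m rows cols x y).1 hb, hxy, ?_, ?_⟩
    · intro q hq' ho; exact (hq x y q).1 (hall1 q hq') ho
    · intro q hq' ho; exact (hq i j q).1 (hall2 q hq') ho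
  · rintro ⟨_, hb, _, h4, h5⟩
    refine ⟨⟨(oneB_iff m rows cols x y).2 hb, ?_⟩, ?_⟩
    · intro q hq'; exact (hq x y q).2 (h4 q hq')
    · intro q hq'; exact (hq i j q).2 (h5 q hq')

theorem PB_iff {m : List (List String)} {rows cols i j : Int}
    (h : 0 ≤ i ∧ i < rows ∧ 0 ≤ j ∧ j < cols) :
    PBfun m rows cols i j = true ↔
      DominoP m rows cols (i, j) (i, j+1) ∨ DominoP m rows cols (i, j) (i+1, j) := by
  unfold PBfun
  rw [Bool.and_eq_true, Bool.or_eq_true]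
  constructor
  · rintro ⟨hmat, hor⟩
    have hone : onePr m rows cols (i, j) :=
      ⟨h.1, h.2.1, h.2.2.1, h.2.2.2, by simpa using hmat⟩
    rcases hor with hl | hl
    · exact Or.inl ((lonely_iff hone (by simp [nbrsL])).1 hl)
    · exact Or.inr ((lonely_iff hone (by simp [nbrsL])).1 hl)
  · intro hor
    have hone : onePr m rows cols (i, j) := by rcases hor with h' | h'; exacts [h'.1, h'.1]
    refine ⟨by simpa using hone.2.2.2.2, ?_⟩
    rcases hor with h' | h'
    · exact Or.inl ((lonely_iff hone (by simp [nbrsL])).2 h')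
    · exact Or.inr ((lonely_iff hone (by simp [nbrsL])).2 h')

-- ---- the cell sequence and row-major order ----
def cellsL (rows cols : Int) : List (Int × Int) :=
  (PySem.List.pyRange 0 rows 1).flatMap (fun i => (PySem.List.pyRange 0 cols 1).map (fun j => (i, j)))

def rmLT (p q : Int × Int) : Prop := p.1 < q.1 ∨ (p.1 = q.1 ∧ p.2 < q.2)

theorem cells_mem {rows cols : Int} {p : Int × Int} :
    p ∈ cellsL rows cols ↔ 0 ≤ p.1 ∧ p.1 < rows ∧ 0 ≤ p.2 ∧ p.2 < cols := by
  rcases p with ⟨a, b⟩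
  simp only [cellsL, List.mem_flatMap, List.mem_map, PySem.List.mem_pyRange_one, Prod.mk.injEq]
  constructor
  · rintro ⟨i, ⟨h0, h1⟩, j, ⟨h2, h3⟩, rfl, rfl⟩
    exact ⟨h0, h1, h2, h3⟩
  · rintro ⟨h0, h1, h2, h3⟩
    exact ⟨a, ⟨h0, h1⟩, b, ⟨h2, h3⟩, rfl, rfl⟩

theorem rmLT_irrefl (p : Int × Int) : ¬ rmLT p p := by unfold rmLT; omega

theorem rmLT_asymm {p q : Int × Int} (h1 : rmLT p q) (h2 : rmLT q p) : False := by
  unfold rmLT at h1 h2; omega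

theorem cells_pairwise (rows cols : Int) : (cellsL rows cols).Pairwise rmLT := by
  rw [cellsL, List.pairwise_flatMap]
  constructor
  · intro a _
    rw [List.pairwise_map]
    exact (PySem.List.pairwise_lt_pyRange_one (a := 0) (b := cols)).imp (fun h => Or.inr ⟨rfl, h⟩)
  · refine (PySem.List.pairwise_lt_pyRange_one (a := 0) (b := rows)).imp ?_
    intro i i' hlt x hx y hy
    rcases List.mem_map.1 hx with ⟨jx, _, rfl⟩
    rcases List.mem_map.1 hy with ⟨jy, _, rfl⟩
    exact Or.inl hlt

-- ---- the outer-loop invariant ----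
def INVvis (m : List (List String)) (rows cols : Int)
    (done : List (Int × Int)) (vis : List (Int × Int)) : Prop :=
  (∀ x ∈ vis, ∃ s ∈ done, ReachP m rows cols s x) ∧
  (∀ a b, DominoP m rows cols a b → (a ∈ done ∨ b ∈ done) → a ∈ vis ∧ b ∈ vis)

theorem stepA_some {m : List (List String)} {rows cols : Int} {fuel : Nat}
    {st : Int × PySem.Set (Int × Int)} {c : Int × Int} {cl vis' : PySem.Set (Int × Int)}
    (hcond : ((matGet m c.1 c.2 == some "1") && !(PySem.Set.contains st.2 c)) = true)
    (hdfs : dfsA m rows cols fuel c.1 c.2 PySem.Set.empty st.2 = some (cl, vis')) :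
    stepA m rows cols fuel st c =
      ((if (PySem.Set.len cl == 2) && isoA m rows cols cl then st.1 + 1 else st.1), vis') := by
  simp only [stepA]
  rw [if_pos hcond, hdfs]

def stepB (m : List (List String)) (rows cols : Int) (cnt : Int) (c : Int × Int) : Int :=
  if PBfun m rows cols c.1 c.2 then cnt + 1 else cnt

theorem outer_loop (m : List (List String)) (rows cols : Int) (fuel : Nat)
    (hfuel : rows.toNat * cols.toNat < fuel) :
    ∀ rem done cnt vis, cellsL rows cols = done ++ rem → INVvis m rows cols done vis →
      (rem.foldl (stepA m rows cols fuel) (cnt, vis)).1 = rem.foldl (stepB m rows cols) cnt := by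
  intro rem
  induction rem with
  | nil => intro done cnt vis _ _; rfl
  | cons c rest ih =>
    intro done cnt vis hcells hinv
    obtain ⟨inv1, inv2⟩ := hinv
    have pw := cells_pairwise rows cols
    rw [hcells] at pw
    rcases List.pairwise_append.1 pw with ⟨pwd, pwc, hcross⟩
    have hdc : ∀ s ∈ done, rmLT s c := fun s hs => hcross s hs c List.mem_cons_self
    have hcr : ∀ q ∈ rest, rmLT c q := (List.pairwise_cons.1 pwc).1
    have hcnotdone : c ∉ done := fun hcd => rmLT_irrefl c (hdc c hcd)
    have hcin : c ∈ cellsL rows cols := by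
      rw [hcells]; exact List.mem_append.2 (Or.inr List.mem_cons_self)
    have hbnd := cells_mem.1 hcin
    have hinDone : ∀ b : Int × Int, onePr m rows cols b → rmLT b c → b ∈ done := by
      intro b hb hblt
      have hbin : b ∈ cellsL rows cols := cells_mem.2 ⟨hb.1, hb.2.1, hb.2.2.1, hb.2.2.2.1⟩
      rw [hcells] at hbin
      rcases List.mem_append.1 hbin with h | h
      · exact h
      · rcases List.mem_cons.1 h with rfl | h
        · exact absurd hblt (rmLT_irrefl b)
        · exact absurd hblt (fun hl => rmLT_asymm hl (hcr b h))
    have hlater : ∀ d : Int × Int, (d = (c.1, c.2+1) ∨ d = (c.1+1, c.2)) → rmLT c d := by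
      rintro d (rfl | rfl)
      · exact Or.inr ⟨rfl, by omega⟩
      · exact Or.inl (by show c.1 < c.1 + 1; omega)
    suffices hstep : ∃ vis', stepA m rows cols fuel (cnt, vis) c = (stepB m rows cols cnt c, vis') ∧
        INVvis m rows cols (done ++ [c]) vis' by
      obtain ⟨vis', h1, h2⟩ := hstep
      rw [List.foldl_cons, List.foldl_cons, h1]
      exact ih (done ++ [c]) (stepB m rows cols cnt c) vis'
        (by rw [hcells]; simp) h2
    by_cases honec : onePr m rows cols c
    · by_cases hv : c ∈ vis
      · -- c already visited: Python skips it; it cannot be the first cell of a lonely pair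
        have hnPB : PBfun m rows cols c.1 c.2 = false := by
          rw [Bool.eq_false_iff]
          intro hPB
          rcases (PB_iff ⟨hbnd.1, hbnd.2.1, hbnd.2.2.1, hbnd.2.2.2⟩).1 hPB with hDom | hDom <;>
          · obtain ⟨s, hs, hr⟩ := inv1 c hv
            rcases reach_domino hDom hr (Or.inl rfl) with hs1 | hs1
            · rw [hs1] at hs; exact hcnotdone hs
            · rw [hs1] at hs; exact rmLT_asymm (hlater _ (by simp)) (hdc _ hs)
        have hstepA : stepA m rows cols fuel (cnt, vis) c = (cnt, vis) := by
          have h2 : PySem.Set.contains vis c = true := (PySem.Set.contains_iff _ _).2 hv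
          simp only [stepA, h2, Bool.not_true, Bool.and_false]
          rfl
        refine ⟨vis, by rw [hstepA]; simp only [stepB, hnPB]; rfl, ?_, ?_⟩
        · intro x hx
          obtain ⟨s, hs, hr⟩ := inv1 x hx
          exact ⟨s, List.mem_append.2 (Or.inl hs), hr⟩
        · intro a b hD2 hm2
          have hself : ∀ b', DominoP m rows cols c b' → c ∈ vis ∧ b' ∈ vis := by
            intro b' hDcb
            obtain ⟨s, hs, hr⟩ := inv1 c hv
            rcases reach_domino hDcb hr (Or.inl rfl) with rfl | rfl
            · exact absurd hs hcnotdone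
            · exact inv2 c s hDcb (Or.inr hs)
          rcases hm2 with h' | h' <;> rcases List.mem_append.1 h' with h'' | h''
          · exact inv2 a b hD2 (Or.inl h'')
          · have ha := List.mem_singleton.1 h''
            subst ha
            exact hself b hD2
          · exact inv2 a b hD2 (Or.inr h'')
          · have hb := List.mem_singleton.1 h''
            subst hb
            have := hself a (domino_symm hD2)
            exact ⟨this.2, this.1⟩
      · -- c is '1' and unvisited: the dfs call runs
        have hcondA : ((matGet m c.1 c.2 == some "1") && !(PySem.Set.contains vis c)) = true := by
          have h1 : (matGet m c.1 c.2 == some "1") = true := beq_iff_eq.2 honec.2.2.2.2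
          have h2 : PySem.Set.contains vis c = false :=
            Bool.eq_false_iff.2 (fun hc' => hv ((PySem.Set.contains_iff _ _).1 hc'))
          rw [h1, h2]
          rfl
        have hUf : Ucard rows cols vis < fuel := Nat.lt_of_le_of_lt (Ucard_le rows cols vis) hfuel
        by_cases hPB : PBfun m rows cols c.1 c.2 = true
        · -- c is the first cell of a lonely pair: the count goes up by one
          have hmain : ∀ d, DominoP m rows cols c d → rmLT c d →
              ∃ vis', stepA m rows cols fuel (cnt, vis) c = (cnt + 1, vis') ∧
                INVvis m rows cols (done ++ [c]) vis' := by
            intro d hDom hlt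
            have hdnv : d ∉ vis := by
              intro hdv
              obtain ⟨s, hs, hr⟩ := inv1 d hdv
              rcases reach_domino hDom hr (Or.inr rfl) with rfl | rfl
              · exact hcnotdone hs
              · exact hv (inv2 c s hDom (Or.inr hs)).1
            have hdne : d ≠ c := nbrs_ne hDom.2.2.1
            have h2f : 2 ≤ rows.toNat * cols.toNat := by
              obtain ⟨b1, b2, b3, b4, _⟩ := hDom.2.1
              unfold rmLT at hlt
              rcases hlt with hlt | ⟨heq, hlt⟩
              · calc 2 = 2 * 1 := rfl
                  _ ≤ rows.toNat * cols.toNat :=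
                    Nat.mul_le_mul (by omega) (by have := hbnd.2.2; omega)
              · calc 2 = 1 * 2 := rfl
                  _ ≤ rows.toNat * cols.toNat :=
                    Nat.mul_le_mul (by have := hbnd.1; omega) (by omega)
            obtain ⟨f3, rfl⟩ : ∃ f3, fuel = f3 + 1 + 1 + 1 := ⟨fuel - 3, by omega⟩
            have hdfs := dfs_domino (m := m) (rows := rows) (cols := cols) (fuel := f3)
              (vis := vis) hDom hv hdnv
            have hpair : PySem.Set.add (PySem.Set.add (PySem.Set.empty (α := Int × Int)) c) d
                = [c, d] := by
              have e1 : PySem.Set.add (PySem.Set.empty (α := Int × Int)) c = [c] := by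
                rw [show (PySem.Set.empty : PySem.Set (Int × Int)) = [] from rfl,
                  PySem.Set.add_of_not_mem (by simp)]
                rfl
              rw [e1, PySem.Set.add_of_not_mem (show d ∉ [c] by simpa using hdne)]
              rfl
            have hlen : (PySem.Set.len ([c, d] : PySem.Set (Int × Int)) == 2) = true := by
              simp [PySem.Set.len_eq]
            have hiso : isoA m rows cols [c, d] = true := by
              rw [iso_iff]
              intro x hx q hq hone_q
              rcases List.mem_cons.1 hx with rfl | hx'
              · simp [hDom.2.2.2.1 q hq hone_q]
              · rcases List.mem_cons.1 hx' with rfl | hx''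
                · simp [hDom.2.2.2.2 q hq hone_q]
                · exact absurd hx'' (by simp)
            refine ⟨PySem.Set.add (PySem.Set.add vis c) d, ?_, ?_, ?_⟩
            · have hct : ((PySem.Set.len ([c, d] : PySem.Set (Int × Int)) == 2) &&
                  isoA m rows cols [c, d]) = true := by simp [hlen, hiso]
              rw [hpair] at hdfs
              rw [stepA_some hcondA hdfs, if_pos hct]
            · intro x hx
              rcases (PySem.Set.mem_add _ _ _).1 hx with hx' | hxd
              · rcases (PySem.Set.mem_add _ _ _).1 hx' with hx'' | hxc
                · obtain ⟨s, hs, hr⟩ := inv1 x hx''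
                  exact ⟨s, List.mem_append.2 (Or.inl hs), hr⟩
                · exact ⟨c, List.mem_append.2 (Or.inr (by simp)),
                    by rw [hxc]; exact ReachP.refl c honec⟩
              · exact ⟨c, List.mem_append.2 (Or.inr (by simp)),
                  by rw [hxd]; exact ReachP.step c c d (ReachP.refl c honec) hDom.2.2.1 hDom.2.1⟩
            · intro a b hD2 hm2
              have hmm : ∀ y, y ∈ vis → y ∈ PySem.Set.add (PySem.Set.add vis c) d := fun y hy =>
                (PySem.Set.mem_add _ _ _).2 (Or.inl ((PySem.Set.mem_add _ _ _).2 (Or.inl hy)))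
              have hcin' : c ∈ PySem.Set.add (PySem.Set.add vis c) d :=
                (PySem.Set.mem_add _ _ _).2 (Or.inl ((PySem.Set.mem_add _ _ _).2 (Or.inr rfl)))
              have hdin' : d ∈ PySem.Set.add (PySem.Set.add vis c) d :=
                (PySem.Set.mem_add _ _ _).2 (Or.inr rfl)
              rcases hm2 with h' | h' <;> rcases List.mem_append.1 h' with h'' | h''
              · have := inv2 a b hD2 (Or.inl h''); exact ⟨hmm a this.1, hmm b this.2⟩
              · have ha := List.mem_singleton.1 h''
                subst ha
                have hbd : b = d := domino_unique hD2 hDom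
                subst hbd
                exact ⟨hcin', hdin'⟩
              · have := inv2 a b hD2 (Or.inr h''); exact ⟨hmm a this.1, hmm b this.2⟩
              · have hb := List.mem_singleton.1 h''
                subst hb
                have had : a = d := domino_unique (domino_symm hD2) hDom
                subst had
                exact ⟨hdin', hcin'⟩
          rcases (PB_iff ⟨hbnd.1, hbnd.2.1, hbnd.2.2.1, hbnd.2.2.2⟩).1 hPB with hDom | hDom
          · obtain ⟨vis', h1, h2⟩ := hmain (c.1, c.2+1) hDom (hlater _ (Or.inl rfl))
            exact ⟨vis', by rw [h1]; simp only [stepB, hPB]; rfl, h2⟩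
          · obtain ⟨vis', h1, h2⟩ := hmain (c.1+1, c.2) hDom (hlater _ (Or.inr rfl))
            exact ⟨vis', by rw [h1]; simp only [stepB, hPB]; rfl, h2⟩
        · -- c is unvisited but not the first cell of a lonely pair: nothing is counted
          have hnoC : ∀ d', DominoP m rows cols c d' → False := by
            intro d' hCd
            have hsh : d' = (c.1-1, c.2) ∨ d' = (c.1+1, c.2) ∨ d' = (c.1, c.2-1) ∨
                d' = (c.1, c.2+1) := by simpa [nbrsL] using hCd.2.2.1
            rcases hsh with rfl | rfl | rfl | rfl
            · exact hv (inv2 c _ hCd (Or.inr (hinDone _ hCd.2.1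
                (Or.inl (show c.1 - 1 < c.1 by omega))))).1
            · exact hPB ((PB_iff ⟨hbnd.1, hbnd.2.1, hbnd.2.2.1, hbnd.2.2.2⟩).2 (Or.inr hCd))
            · exact hv (inv2 c _ hCd (Or.inr (hinDone _ hCd.2.1
                (Or.inr ⟨rfl, show c.2 - 1 < c.2 by omega⟩)))).1
            · exact hPB ((PB_iff ⟨hbnd.1, hbnd.2.1, hbnd.2.2.1, hbnd.2.2.2⟩).2 (Or.inl hCd))
          obtain ⟨r, hdfs⟩ := (dfs_go_some m rows cols fuel).1 c.1 c.2 PySem.Set.empty vis hUf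
          obtain ⟨cl1, vis1⟩ := r
          obtain ⟨d1, d2, d3, d4⟩ := (dfs_go_inv m rows cols fuel).1 c.1 c.2 PySem.Set.empty vis
            (cl1, vis1) hdfs
          have hfacts : ∀ x ∈ cl1, ReachP m rows cols (c.1, c.2) x ∧
              (x = (c.1, c.2) ∨ ∃ p, p ∈ nbrsL x.1 x.2 ∧ onePr m rows cols p) := by
            intro x hx
            rcases d3 x hx with h' | h'
            · exact absurd h' (by simp [PySem.Set.empty])
            · exact h'
          have hcnt : ((PySem.Set.len cl1 == 2) && isoA m rows cols cl1) = false := by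
            rw [Bool.eq_false_iff]
            intro hcond2
            rw [Bool.and_eq_true] at hcond2
            obtain ⟨hlen2, hiso2⟩ := hcond2
            have hnd : cl1.Nodup := d4 List.nodup_nil
            have hlength : cl1.length = 2 := by
              rw [PySem.Set.len_eq] at hlen2
              have := beq_iff_eq.1 hlen2
              exact_mod_cast this
            obtain ⟨a, b, rfl⟩ := List.length_eq_two.1 hlength
            have hab : a ≠ b := by
              rcases List.nodup_cons.1 hnd with ⟨h1', _⟩
              simpa using h1'
            have hiso3 := (iso_iff _).1 hiso2
            have hadj : b ∈ nbrsL a.1 a.2 := by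
              rcases (hfacts a (by simp)).2 with ha | ⟨p, hp, hpone⟩
              · rcases (hfacts b (by simp)).2 with hb | ⟨p, hp, hpone⟩
                · exact absurd (ha.trans hb.symm) hab
                · have hpin := hiso3 b (by simp) p hp hpone
                  have hpb : p ≠ b := nbrs_ne hp
                  have hpa : p = a := by
                    rcases List.mem_cons.1 hpin with h' | h'
                    · exact h'
                    · simpa [hpb] using h'
                  exact (nbrs_symm b a).1 (hpa ▸ hp)
              · have hpin := hiso3 a (by simp) p hp hpone
                have hpa : p ≠ a := nbrs_ne hp
                have hpb : p = b := by
                  rcases List.mem_cons.1 hpin with h' | h'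
                  · exact absurd h' hpa
                  · simpa using h'
                exact hpb ▸ hp
            have hDab : DominoP m rows cols a b := by
              refine ⟨reach_one_tgt (hfacts a (by simp)).1,
                reach_one_tgt (hfacts b (by simp)).1, hadj, ?_, ?_⟩
              · intro q hq hone_q
                have hqin := hiso3 a (by simp) q hq hone_q
                rcases List.mem_cons.1 hqin with h' | h'
                · exact absurd h' (nbrs_ne hq)
                · simpa using h'
              · intro q hq hone_q
                have hqin := hiso3 b (by simp) q hq hone_q
                rcases List.mem_cons.1 hqin with h' | h'
                · exact h'
                · exact absurd (by simpa using h') (nbrs_ne hq)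
            have hc_ab : c = a ∨ c = b := reach_domino hDab (hfacts a (by simp)).1 (Or.inl rfl)
            rcases hc_ab with rfl | rfl
            · exact hnoC b hDab
            · exact hnoC a (domino_symm hDab)
          refine ⟨vis1, ?_, ?_, ?_⟩
          · rw [stepA_some hcondA hdfs, if_neg (ne_true_of_eq_false hcnt)]
            have hPBf : PBfun m rows cols c.1 c.2 = false := Bool.eq_false_iff.2 hPB
            simp only [stepB, hPBf]
            rfl
          · intro x hx
            rcases d2 x hx with h' | h'
            · obtain ⟨s, hs, hr⟩ := inv1 x h'
              exact ⟨s, List.mem_append.2 (Or.inl hs), hr⟩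
            · exact ⟨c, List.mem_append.2 (Or.inr (by simp)), h'⟩
          · intro a b hD2 hm2
            rcases hm2 with h' | h' <;> rcases List.mem_append.1 h' with h'' | h''
            · have := inv2 a b hD2 (Or.inl h''); exact ⟨d1 a this.1, d1 b this.2⟩
            · have ha := List.mem_singleton.1 h''
              subst ha
              exact (hnoC b hD2).elim
            · have := inv2 a b hD2 (Or.inr h''); exact ⟨d1 a this.1, d1 b this.2⟩
            · have hb := List.mem_singleton.1 h''
              subst hb
              exact (hnoC a (domino_symm hD2)).elim
    · -- c is in range but not a '1'
      have hm : matGet m c.1 c.2 ≠ some "1" := fun he =>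
        honec ⟨hbnd.1, hbnd.2.1, hbnd.2.2.1, hbnd.2.2.2, he⟩
      have hmb : (matGet m c.1 c.2 == some "1") = false := by
        rw [Bool.eq_false_iff]
        exact fun hb => hm (beq_iff_eq.1 hb)
      refine ⟨vis, by simp only [stepA, stepB, PBfun, hmb, Bool.false_and, Bool.and_false]; rfl,
        ?_, ?_⟩
      · intro x hx
        obtain ⟨s, hs, hr⟩ := inv1 x hx
        exact ⟨s, List.mem_append.2 (Or.inl hs), hr⟩
      · intro a b hD2 hm2
        have hgo : a ∈ done ∨ b ∈ done := by
          rcases hm2 with h' | h' <;> rcases List.mem_append.1 h' with h'' | h''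
          · exact Or.inl h''
          · exact absurd (hD2.1) (by rw [List.mem_singleton.1 h'']; exact honec)
          · exact Or.inr h''
          · exact absurd (hD2.2.1) (by rw [List.mem_singleton.1 h'']; exact honec)
        exact inv2 a b hD2 hgo

theorem flat_foldA (m : List (List String)) (rows cols : Int) (fuel : Nat)
    (st : Int × PySem.Set (Int × Int)) :
    (PySem.List.pyRange 0 rows 1).foldl (fun st i =>
      (PySem.List.pyRange 0 cols 1).foldl (fun st j => stepA m rows cols fuel st (i, j)) st) st =
    (cellsL rows cols).foldl (stepA m rows cols fuel) st := by
  rw [cellsL, List.foldl_flatMap]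
  simp only [List.foldl_map]

theorem flat_foldB (m : List (List String)) (rows cols : Int) (cnt : Int) :
    (PySem.List.pyRange 0 rows 1).foldl (fun cnt i =>
      (PySem.List.pyRange 0 cols 1).foldl
        (fun cnt j => if PBfun m rows cols i j then cnt + 1 else cnt) cnt) cnt =
    (cellsL rows cols).foldl (stepB m rows cols) cnt := by
  rw [cellsL, List.foldl_flatMap]
  simp only [List.foldl_map]
  rfl

theorem inv_init (m : List (List String)) (rows cols : Int) :
    INVvis m rows cols [] PySem.Set.empty := by
  constructor
  · intro x hx
    exact absurd hx (by simp [PySem.Set.empty])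
  · intro a b _ h
    rcases h with h | h <;> simp at h

-- ===== VERDICT (by name: the statement is the Claim_ definition above) =====
theorem numara_clustere_spec : Claim_equal_numara_clustere := by
  intro matrix _ _
  show numara_clustere matrix = numara_clustere_alt matrix
  simp only [numara_clustere, numara_clustere_alt]
  rw [flat_foldA, flat_foldB]
  exact outer_loop matrix _ _ _ (Nat.lt_succ_self _) _ [] 0 PySem.Set.empty
    (List.nil_append _).symm (inv_init _ _ _)
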